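-- pv_equiv track=rewrite | github.com/learnore/helloshen | z_huawei_od/24_od/100/11_逻辑判断.py | calculate_largest_area
-- ===== SOURCE A (Python) =====
-- def calculate_largest_area(m, n, grid):
--     # 创建一个字典来存储 每个数字旗子 的最小矩阵边界
--     flags = {}
--
--     for i in range(m):
--         for j in range(n):
--             flag = grid[i][j]
--             # 如果当前位置有旗子
--             if flag != 0:
--                 if flag in flags:
--                     # 更新旗子的边界
--                     flags[flag]["min_i"] = min(flags[flag]["min_i"], i)
--                     flags[flag]["max_i"] = max(flags[flag]["max_i"], i)     # 注意是 max
--                     flags[flag]["min_j"] = min(flags[flag]["min_j"], j)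
--                     flags[flag]["max_j"] = max(flags[flag]["max_j"], j)     # 注意是 max
--                 else:
--                     # 如果旗子是第一次出现，初始化其边界
--                     flags[flag] = {
--                         "min_i": i,
--                         "max_i": i,
--                         "min_j": j,
--                         "max_j": j
--                     }
--     # 遍历所有旗子，计算它们的最小覆盖矩阵面积，并找到最大值
--     max_area = 0
--     for key, value in flags.items():
--         area = (flags[key]["max_i"] - flags[key]["min_i"] +1) * (flags[key]["max_j"] - flags[key]["min_j"] +1)      # 别忘了+1
--         max_area = max(max_area, area)
--
--     # 如果没有旗子，则返回1
--     return max_area if max_area > 0 else 1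
-- ===== SOURCE B (Python) =====
-- def calculate_largest_area(m, n, grid):
--     # collect every nonzero cell as (value, i, j), group coordinates per value, then reduce
--     cells = [(grid[i][j], i, j) for i in range(m) for j in range(n) if grid[i][j] != 0]
--     coords = {}
--     for v, i, j in cells:
--         coords.setdefault(v, []).append((i, j))
--     best = 1
--     for pts in coords.values():
--         rows = [p[0] for p in pts]
--         cols = [p[1] for p in pts]
--         best = max(best, (max(rows) - min(rows) + 1) * (max(cols) - min(cols) + 1))
--     return best
-- ===== Notes on version B (the rewrite author's own statement) =====
-- stated objective: alternative
-- what changed: A streams over the grid while maintaining per-flag min/max bounds in a dict of dicts; B first flattens the grid into a list of nonzero (value,i,j) cells, groups the coordinates per value into lists, and then in a separate reduce pass takes min/max of each group's rows and columns, starting the running maximum at 1 so no final fix-up branch is needed.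
import Mathlib
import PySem

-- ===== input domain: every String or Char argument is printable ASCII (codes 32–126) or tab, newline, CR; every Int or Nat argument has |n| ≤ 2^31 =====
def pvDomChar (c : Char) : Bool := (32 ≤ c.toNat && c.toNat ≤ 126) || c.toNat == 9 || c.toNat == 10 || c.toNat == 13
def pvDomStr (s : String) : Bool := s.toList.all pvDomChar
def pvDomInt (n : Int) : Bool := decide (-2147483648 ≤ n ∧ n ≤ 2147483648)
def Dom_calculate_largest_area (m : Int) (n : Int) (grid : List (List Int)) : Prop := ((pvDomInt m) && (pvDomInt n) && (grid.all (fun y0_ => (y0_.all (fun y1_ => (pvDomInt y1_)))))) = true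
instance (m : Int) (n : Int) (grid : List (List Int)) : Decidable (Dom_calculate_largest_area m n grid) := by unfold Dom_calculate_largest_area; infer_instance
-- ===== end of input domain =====

-- B replaces A's streaming per-flag bound maintenance by a collect-then-reduce decomposition
-- (flatten the grid to nonzero (value,i,j) cells, group coordinates per value, then take
-- min/max of each group); same results, same asymptotic cost (objective: alternative).

-- grid[i][j] (both Pythons read the cell the same way; in range under Pre_, where Python returns)
def pvCell (grid : List (List Int)) (i j : Int) : Int :=
  (PySem.List.pyGet? ((PySem.List.pyGet? grid i).getD []) j).getD 0

-- ===== PORT A =====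
def calculate_largest_area (m : Int) (n : Int) (grid : List (List Int)) : Int :=
  let flags : PySem.Dict Int (Int × Int × Int × Int) :=
    (PySem.List.pyRange 0 m 1).foldl (fun flags i =>
      (PySem.List.pyRange 0 n 1).foldl (fun flags j =>
        let flag := pvCell grid i j
        if flag ≠ 0 then
          match flags.get? flag with
          | some b => flags.insert flag (min b.1 i, max b.2.1 i, min b.2.2.1 j, max b.2.2.2 j)
          | none   => flags.insert flag (i, i, j, j)
        else flags) flags) PySem.Dict.empty
  let max_area :=
    flags.items.foldl (fun max_area kv =>
      let b := (flags.get? kv.1).getD (0, 0, 0, 0)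
      max max_area ((b.2.1 - b.1 + 1) * (b.2.2.2 - b.2.2.1 + 1))) 0
  if max_area > 0 then max_area else 1

-- ===== PORT B =====
def calculate_largest_area_alt (m : Int) (n : Int) (grid : List (List Int)) : Int :=
  let cells : List (Int × Int × Int) :=
    (PySem.List.pyRange 0 m 1).flatMap (fun i =>
      (PySem.List.pyRange 0 n 1).filterMap (fun j =>
        if pvCell grid i j ≠ 0 then some (pvCell grid i j, i, j) else none))
  let coords : PySem.Dict Int (List (Int × Int)) :=
    cells.foldl (fun d t => d.modify t.1 [] (· ++ [(t.2.1, t.2.2)])) PySem.Dict.empty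
  coords.values.foldl (fun best pts =>
    let rows := pts.map (·.1)
    let cols := pts.map (·.2)
    max best (((PySem.List.max? rows (fun y => y)).getD 0 - (PySem.List.min? rows (fun y => y)).getD 0 + 1) *
              ((PySem.List.max? cols (fun y => y)).getD 0 - (PySem.List.min? cols (fun y => y)).getD 0 + 1))) 1

-- ===== PRECONDITION & SPEC =====
-- Pre_ excludes exactly the inputs where Python A raises an IndexError: when n > 0 the loops
-- read grid[i][j] for all 0 ≤ i < m, 0 ≤ j < n, so grid must have at least m rows and each of
-- the first m rows at least n entries (when n ≤ 0 nothing is read and A always returns).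
def Pre_calculate_largest_area (m : Int) (n : Int) (grid : List (List Int)) : Prop :=
  0 < n → (m ≤ (grid.length : Int) ∧ ∀ row ∈ grid.take m.toNat, n ≤ (row.length : Int))
instance (m : Int) (n : Int) (grid : List (List Int)) : Decidable (Pre_calculate_largest_area m n grid) := by
  unfold Pre_calculate_largest_area; infer_instance

def pvWitness_calculate_largest_area : Int × Int × List (List Int) := (2, 3, [[1, 0, 1], [0, 2, 1]])

def Spec_calculate_largest_area (m : Int) (n : Int) (grid : List (List Int)) (out : Int) : Prop := out = calculate_largest_area_alt m n grid
instance (m : Int) (n : Int) (grid : List (List Int)) (out : Int) : Decidable (Spec_calculate_largest_area m n grid out) := by unfold Spec_calculate_largest_area; infer_instance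

-- ===== CLAIM (what is proved, stated in full; the proofs are below) =====
def Claim_equal_calculate_largest_area : Prop := ∀ (m : Int) (n : Int) (grid : List (List Int)), Dom_calculate_largest_area m n grid → Pre_calculate_largest_area m n grid → Spec_calculate_largest_area m n grid (calculate_largest_area m n grid)

-- ===== LEMMAS AND PROOFS =====

def pvMinF (l : List Int) : Int := (PySem.List.min? l (fun y => y)).getD 0
def pvMaxF (l : List Int) : Int := (PySem.List.max? l (fun y => y)).getD 0
def pvBounds (pts : List (Int × Int)) : Int × Int × Int × Int :=
  (pvMinF (pts.map (·.1)), pvMaxF (pts.map (·.1)), pvMinF (pts.map (·.2)), pvMaxF (pts.map (·.2)))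
def pvStepA (grid : List (List Int)) (d : PySem.Dict Int (Int × Int × Int × Int)) (ij : Int × Int) :
    PySem.Dict Int (Int × Int × Int × Int) :=
  match d.get? (pvCell grid ij.1 ij.2) with
  | some b => d.insert (pvCell grid ij.1 ij.2) (min b.1 ij.1, max b.2.1 ij.1, min b.2.2.1 ij.2, max b.2.2.2 ij.2)
  | none   => d.insert (pvCell grid ij.1 ij.2) (ij.1, ij.1, ij.2, ij.2)
def pvStepB (grid : List (List Int)) (d : PySem.Dict Int (List (Int × Int))) (ij : Int × Int) :
    PySem.Dict Int (List (Int × Int)) :=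
  d.modify (pvCell grid ij.1 ij.2) [] (· ++ [(ij.1, ij.2)])
def pvInv (fa : PySem.Dict Int (Int × Int × Int × Int)) (fb : PySem.Dict Int (List (Int × Int))) : Prop :=
  fb.keys = fa.keys ∧ fa.keys.Nodup ∧
  ∀ k, fa.contains k = true → fb.getD k [] ≠ [] ∧ fa.getD k (0, 0, 0, 0) = pvBounds (fb.getD k [])
theorem pvMinF_append (l : List Int) (a : Int) (h : l ≠ []) : pvMinF (l ++ [a]) = min (pvMinF l) a := by
  obtain ⟨x, t, rfl⟩ := List.exists_cons_of_ne_nil h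
  simp [pvMinF, List.cons_append, PySem.List.min?_id_cons, List.foldl_append]
theorem pvMaxF_append (l : List Int) (a : Int) (h : l ≠ []) : pvMaxF (l ++ [a]) = max (pvMaxF l) a := by
  obtain ⟨x, t, rfl⟩ := List.exists_cons_of_ne_nil h
  simp [pvMaxF, List.cons_append, PySem.List.max?_id_cons, List.foldl_append]
theorem pvBounds_append (pts : List (Int × Int)) (x : Int × Int) (h : pts ≠ []) :
    pvBounds (pts ++ [x]) =
      (min (pvBounds pts).1 x.1, max (pvBounds pts).2.1 x.1,
       min (pvBounds pts).2.2.1 x.2, max (pvBounds pts).2.2.2 x.2) := by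
  have hm : pts.map (Prod.fst) ≠ [] := by simpa using h
  have hm2 : pts.map (Prod.snd) ≠ [] := by simpa using h
  simp [pvBounds, List.map_append, pvMinF_append _ _ hm, pvMaxF_append _ _ hm,
        pvMinF_append _ _ hm2, pvMaxF_append _ _ hm2]
theorem pvBounds_single (x : Int × Int) : pvBounds [x] = (x.1, x.1, x.2, x.2) := by
  simp [pvBounds, pvMinF, pvMaxF, PySem.List.min?_id_cons, PySem.List.max?_id_cons]
theorem pvInv_step (grid : List (List Int)) (fa : PySem.Dict Int (Int × Int × Int × Int))
    (fb : PySem.Dict Int (List (Int × Int))) (ij : Int × Int) (h : pvInv fa fb) :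
    pvInv (pvStepA grid fa ij) (pvStepB grid fb ij) := by
  obtain ⟨hkeys, hnd, hval⟩ := h
  by_cases hc : fa.contains (pvCell grid ij.1 ij.2) = true
  · obtain ⟨b, hb⟩ : ∃ b, fa.get? (pvCell grid ij.1 ij.2) = some b := by
      rw [PySem.Dict.contains_eq_isSome_get?] at hc
      exact Option.isSome_iff_exists.mp hc
    have hbD : fa.getD (pvCell grid ij.1 ij.2) (0,0,0,0) = b :=
      PySem.Dict.getD_of_get?_eq_some _ _ hb
    obtain ⟨hne, hbv⟩ := hval _ hc
    have hcb : fb.contains (pvCell grid ij.1 ij.2) = true := by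
      rw [PySem.Dict.contains_iff_mem_keys] at hc ⊢; rwa [hkeys]
    simp only [pvStepA, pvStepB, hb]
    refine ⟨?_, ?_, ?_⟩
    · rw [PySem.Dict.keys_modify, PySem.Dict.keys_insert_of_contains _ _ hcb,
          PySem.Dict.keys_insert_of_contains _ _ hc, hkeys]
    · rw [PySem.Dict.keys_insert_of_contains _ _ hc]; exact hnd
    · intro k hk
      rw [PySem.Dict.getD_insert, PySem.Dict.getD_modify]
      by_cases hkv : k = pvCell grid ij.1 ij.2
      · rw [if_pos hkv, if_pos hkv]
        refine ⟨by show _ ++ [(ij.1, ij.2)] ≠ []; simp, ?_⟩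
        show _ = pvBounds (fb.getD (pvCell grid ij.1 ij.2) [] ++ [(ij.1, ij.2)])
        rw [pvBounds_append _ _ hne, ← hbv, hbD]
      · rw [if_neg hkv, if_neg hkv]
        rw [PySem.Dict.contains_insert] at hk
        simp only [Bool.or_eq_true, beq_iff_eq] at hk
        exact hval k (hk.resolve_left hkv)
  · have hcf : fa.contains (pvCell grid ij.1 ij.2) = false := by simpa using hc
    have hgn : fa.get? (pvCell grid ij.1 ij.2) = none := by
      rw [PySem.Dict.contains_eq_isSome_get?] at hcf
      exact Option.not_isSome_iff_eq_none.mp (by simp [hcf])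
    have hcbf : fb.contains (pvCell grid ij.1 ij.2) = false := by
      rw [← Bool.not_eq_true, PySem.Dict.contains_iff_mem_keys, hkeys,
          ← PySem.Dict.contains_iff_mem_keys, hcf]
      simp
    have hbD0 : fb.getD (pvCell grid ij.1 ij.2) [] = [] :=
      PySem.Dict.getD_of_not_contains _ _ hcbf
    simp only [pvStepA, pvStepB, hgn]
    refine ⟨?_, ?_, ?_⟩
    · rw [PySem.Dict.keys_modify, PySem.Dict.keys_insert_of_not_contains _ _ hcbf,
          PySem.Dict.keys_insert_of_not_contains _ _ hcf, hkeys]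
    · exact PySem.Dict.nodup_keys_insert _ _ _ hnd
    · intro k hk
      rw [PySem.Dict.getD_insert, PySem.Dict.getD_modify]
      by_cases hkv : k = pvCell grid ij.1 ij.2
      · rw [if_pos hkv, if_pos hkv, hbD0]
        exact ⟨by show _ ++ [(ij.1, ij.2)] ≠ []; simp, by rw [List.nil_append, pvBounds_single]⟩
      · rw [if_neg hkv, if_neg hkv]
        rw [PySem.Dict.contains_insert] at hk
        simp only [Bool.or_eq_true, beq_iff_eq] at hk
        exact hval k (hk.resolve_left hkv)

def pvArea (b : Int × Int × Int × Int) : Int := (b.2.1 - b.1 + 1) * (b.2.2.2 - b.2.2.1 + 1)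
def pvPairs (m n : Int) : List (Int × Int) :=
  (PySem.List.pyRange 0 m 1).flatMap (fun i => (PySem.List.pyRange 0 n 1).map (fun j => (i, j)))
def pvPd (grid : List (List Int)) (ij : Int × Int) : Bool := decide (pvCell grid ij.1 ij.2 ≠ 0)

theorem pv_foldl_pairs {δ : Type} (P Q : List Int) (F : δ → Int × Int → δ) (init : δ) :
    P.foldl (fun d i => Q.foldl (fun d j => F d (i, j)) d) init
    = (P.flatMap (fun i => Q.map (fun j => (i, j)))).foldl F init := by
  rw [List.foldl_flatMap]
  simp [List.foldl_map]

theorem pvPortA_eq (m n : Int) (grid : List (List Int)) : calculate_largest_area m n grid =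
    (let fa := ((pvPairs m n).filter (pvPd grid)).foldl (pvStepA grid) PySem.Dict.empty
     let max_area := fa.items.foldl (fun ma kv => max ma (pvArea ((fa.get? kv.1).getD (0,0,0,0)))) 0
     if max_area > 0 then max_area else 1) := by
  have h1 : (PySem.List.pyRange 0 m 1).foldl (fun flags i =>
      (PySem.List.pyRange 0 n 1).foldl (fun flags j =>
        if pvCell grid i j ≠ 0 then
          match flags.get? (pvCell grid i j) with
          | some b => flags.insert (pvCell grid i j) (min b.1 i, max b.2.1 i, min b.2.2.1 j, max b.2.2.2 j)
          | none   => flags.insert (pvCell grid i j) (i, i, j, j)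
        else flags) flags) (PySem.Dict.empty : PySem.Dict Int (Int × Int × Int × Int))
      = ((pvPairs m n).filter (pvPd grid)).foldl (pvStepA grid) PySem.Dict.empty :=
    (pv_foldl_pairs (PySem.List.pyRange 0 m 1) (PySem.List.pyRange 0 n 1)
        (fun d ij => if pvCell grid ij.1 ij.2 ≠ 0 then pvStepA grid d ij else d)
        PySem.Dict.empty).trans
      (PySem.List.foldl_ite_eq_foldl_filter (fun ij => pvCell grid ij.1 ij.2 ≠ 0) (pvStepA grid) _ _)
  rw [calculate_largest_area]
  simp only [h1]
  rfl


theorem pvCells_eq (m n : Int) (grid : List (List Int)) :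
    (PySem.List.pyRange 0 m 1).flatMap (fun i =>
      (PySem.List.pyRange 0 n 1).filterMap (fun j =>
        if pvCell grid i j ≠ 0 then some (pvCell grid i j, i, j) else none))
    = ((pvPairs m n).filter (pvPd grid)).map (fun ij => (pvCell grid ij.1 ij.2, ij.1, ij.2)) := by
  rw [pvPairs]
  induction (PySem.List.pyRange 0 m 1) with
  | nil => rfl
  | cons a P ih =>
    simp only [List.flatMap_cons, List.filter_append, List.map_append, ih]
    congr 1
    induction (PySem.List.pyRange 0 n 1) with
    | nil => rfl
    | cons b Q ihQ =>
      simp only [List.filterMap_cons, List.map_cons, List.filter_cons]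
      by_cases hb : pvCell grid a b ≠ 0
      · rw [if_pos hb]
        have : pvPd grid (a, b) = true := by simp [pvPd, hb]
        simp only [this, if_pos]
        simp only [List.map_cons, ihQ]
      · rw [if_neg hb]
        have : pvPd grid (a, b) = false := by simp [pvPd]; simpa using hb
        simp only [this]
        simp only [Bool.false_eq_true, if_false, ihQ]

theorem pvPortB_eq (m n : Int) (grid : List (List Int)) : calculate_largest_area_alt m n grid =
    (let fb := ((pvPairs m n).filter (pvPd grid)).foldl (pvStepB grid) PySem.Dict.empty
     fb.values.foldl (fun best pts => max best (pvArea (pvBounds pts))) 1) := by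
  rw [calculate_largest_area_alt]
  simp only [pvCells_eq m n grid, List.foldl_map]
  rfl


theorem pvArea_bounds_pos (pts : List (Int × Int)) (h : pts ≠ []) : 1 ≤ pvArea (pvBounds pts) := by
  obtain ⟨x, t, rfl⟩ := List.exists_cons_of_ne_nil h
  have h1 : pvMinF ((x :: t).map (·.1)) ≤ pvMaxF ((x :: t).map (·.1)) := by
    simp only [List.map_cons, pvMinF, pvMaxF, PySem.List.min?_id_cons, PySem.List.max?_id_cons,
      Option.getD_some]
    exact le_trans (PySem.List.foldl_min_le (t.map (·.1)) x.1).1 (PySem.List.le_foldl_max (t.map (·.1)) x.1).1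
  have h2 : pvMinF ((x :: t).map (·.2)) ≤ pvMaxF ((x :: t).map (·.2)) := by
    simp only [List.map_cons, pvMinF, pvMaxF, PySem.List.min?_id_cons, PySem.List.max?_id_cons,
      Option.getD_some]
    exact le_trans (PySem.List.foldl_min_le (t.map (·.2)) x.2).1 (PySem.List.le_foldl_max (t.map (·.2)) x.2).1
  show 1 ≤ (pvMaxF _ - pvMinF _ + 1) * (pvMaxF _ - pvMinF _ + 1)
  nlinarith [h1, h2]

theorem pvFoldl_max_pos' (l : List Int) (h : ∀ a ∈ l, 1 ≤ a) :
    (if l.foldl max 0 > 0 then l.foldl max 0 else 1) = l.foldl max 1 := by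
  cases l with
  | nil => simp
  | cons a t =>
    have ha : 1 ≤ a := h a (by simp)
    have h0 : max 0 a = a := by omega
    have h1 : max 1 a = a := by omega
    have hle := (PySem.List.le_foldl_max t a).1
    simp only [List.foldl_cons, h0, h1]
    rw [if_pos (by omega)]

theorem pvFinal_eq (fa : PySem.Dict Int (Int × Int × Int × Int)) (fb : PySem.Dict Int (List (Int × Int)))
    (h : pvInv fa fb) :
    (let max_area := fa.items.foldl (fun ma kv => max ma (pvArea ((fa.get? kv.1).getD (0,0,0,0)))) 0
     if max_area > 0 then max_area else 1)
    = fb.values.foldl (fun best pts => max best (pvArea (pvBounds pts))) 1 := by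
  obtain ⟨hkeys, hnd, hval⟩ := h
  have hndb : fb.keys.Nodup := by rw [hkeys]; exact hnd
  rw [PySem.Dict.items_eq_map_keys fa hnd (0,0,0,0), PySem.Dict.values_eq_map_keys fb hndb [], hkeys]
  rw [List.foldl_map, List.foldl_map]
  have hcong : ∀ k ∈ fa.keys, pvArea ((fa.get? k).getD (0,0,0,0)) = pvArea (pvBounds (fb.getD k [])) := by
    intro k hkmem
    have hc : fa.contains k = true := (PySem.Dict.contains_iff_mem_keys fa k).mpr hkmem
    rw [← PySem.Dict.getD_eq_get?_getD, (hval k hc).2]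
  have e1 : fa.keys.foldl (fun ma k => max ma (pvArea ((fa.get? k).getD (0,0,0,0)))) 0
      = (fa.keys.map (fun k => pvArea (pvBounds (fb.getD k [])))).foldl max 0 := by
    rw [List.foldl_map]
    exact PySem.List.foldl_congr_mem fa.keys
      (fun ma k => max ma (pvArea ((fa.get? k).getD (0,0,0,0))))
      (fun ma k => max ma (pvArea (pvBounds (fb.getD k [])))) 0
      (fun acc k hk => by simp only []; rw [hcong k hk])
  have e2 : fa.keys.foldl (fun best k => max best (pvArea (pvBounds (fb.getD k [])))) 1
      = (fa.keys.map (fun k => pvArea (pvBounds (fb.getD k [])))).foldl max 1 := by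
    rw [List.foldl_map]
  have hpos : ∀ a ∈ fa.keys.map (fun k => pvArea (pvBounds (fb.getD k []))), 1 ≤ a := by
    intro a ha
    obtain ⟨k, hk, rfl⟩ := List.mem_map.mp ha
    exact pvArea_bounds_pos _ (hval k ((PySem.Dict.contains_iff_mem_keys fa k).mpr hk)).1
  calc (let max_area := fa.keys.foldl (fun ma k => max ma (pvArea ((fa.get? k).getD (0,0,0,0)))) 0
        if max_area > 0 then max_area else 1)
      = (let l := fa.keys.map (fun k => pvArea (pvBounds (fb.getD k [])))
         if l.foldl max 0 > 0 then l.foldl max 0 else 1) := by rw [e1]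
    _ = (fa.keys.map (fun k => pvArea (pvBounds (fb.getD k [])))).foldl max 1 :=
        pvFoldl_max_pos' _ hpos
    _ = fa.keys.foldl (fun best k => max best (pvArea (pvBounds (fb.getD k [])))) 1 := e2.symm

theorem pvInv_foldl (grid : List (List Int)) (l : List (Int × Int))
    (fa : PySem.Dict Int (Int × Int × Int × Int)) (fb : PySem.Dict Int (List (Int × Int)))
    (h : pvInv fa fb) : pvInv (l.foldl (pvStepA grid) fa) (l.foldl (pvStepB grid) fb) := by
  induction l generalizing fa fb with
  | nil => exact h
  | cons x t ih => exact ih _ _ (pvInv_step grid fa fb x h)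

theorem pvInv_empty : pvInv PySem.Dict.empty PySem.Dict.empty :=
  ⟨rfl, List.nodup_nil, fun k hk => absurd hk (by simp [PySem.Dict.contains_empty])⟩

theorem calculate_largest_area_eq_alt (m : Int) (n : Int) (grid : List (List Int)) :
    calculate_largest_area m n grid = calculate_largest_area_alt m n grid := by
  rw [pvPortA_eq, pvPortB_eq]
  exact pvFinal_eq _ _
    (pvInv_foldl grid ((pvPairs m n).filter (pvPd grid)) PySem.Dict.empty PySem.Dict.empty pvInv_empty)

-- ===== VERDICT (by name: the statement is the Claim_ definition above) =====
theorem calculate_largest_area_spec : Claim_equal_calculate_largest_area := by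
  intro m n grid _ _
  exact calculate_largest_area_eq_alt m n grid
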